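-- pv_equiv track=rewrite | github.com/haskelladdict/sconcho | sconcho/gui/symbol_widget.py | symbols_by_category
-- ===== SOURCE A (Python) =====
-- def symbols_by_category(symbols):
--     """ Given a dictionary of knitting symbols returns another
--     dictionary with the category as key and value a list of
--     all symbols with that category.
--
--     """
--
--     # assemble the categories
--     rawSortedSymbols = {}
--     for symbol in symbols.values():
--
--         symbolKey = symbol["category"]
--         if symbolKey in rawSortedSymbols:
--             rawSortedSymbols[symbolKey].append(symbol)
--         else:
--             rawSortedSymbols[symbolKey] = [symbol]
--
--     return rawSortedSymbols
-- ===== SOURCE B (Python) =====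
-- def symbols_by_category(symbols):
--     syms = list(symbols.values())
--     categories = list(dict.fromkeys(s["category"] for s in syms))
--     return {c: [s for s in syms if s["category"] == c] for c in categories}
-- ===== Notes on version B (the rewrite author's own statement) =====
-- stated objective: idiomatic
-- what changed: Instead of one pass that grows per-category lists inside a dict, B first collects the distinct categories in first-occurrence order with dict.fromkeys and then builds the result as a dict comprehension with one filter pass per category.
import Mathlib
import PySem

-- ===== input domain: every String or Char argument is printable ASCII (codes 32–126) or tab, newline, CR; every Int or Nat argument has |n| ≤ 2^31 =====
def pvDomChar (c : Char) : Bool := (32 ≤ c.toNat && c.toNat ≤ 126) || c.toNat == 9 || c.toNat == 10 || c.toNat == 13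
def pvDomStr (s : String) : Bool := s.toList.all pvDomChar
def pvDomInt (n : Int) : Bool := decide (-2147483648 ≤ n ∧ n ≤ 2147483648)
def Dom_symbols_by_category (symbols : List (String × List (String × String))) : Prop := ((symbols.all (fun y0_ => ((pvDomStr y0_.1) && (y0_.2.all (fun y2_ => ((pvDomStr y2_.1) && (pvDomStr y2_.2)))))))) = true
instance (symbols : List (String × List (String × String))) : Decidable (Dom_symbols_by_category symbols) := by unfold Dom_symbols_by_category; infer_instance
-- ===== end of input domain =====

-- B groups by first collecting the distinct categories (dict.fromkeys) and then filtering the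
-- symbol list once per category, instead of A's single pass growing per-category lists in a dict.

-- shared helper: symbol["category"] (first-match association-list lookup; none = KeyError)
def pvCat (sym : List (String × String)) : Option String := (PySem.Dict.mk sym).get? "category"

-- ===== PORT A =====
def symbols_by_category (symbols : List (String × List (String × String))) : List (String × List (List (String × String))) :=
  ((symbols.map (·.2)).foldl (fun d sym =>
      match pvCat sym with
      | some k => if d.contains k then d.modify k [] (· ++ [sym]) else d.insert k [sym]
      | none => d)  -- Python raises KeyError here; excluded by Pre_
    PySem.Dict.empty).items

-- ===== PORT B =====
def symbols_by_category_alt (symbols : List (String × List (String × String))) : List (String × List (List (String × String))) :=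
  let syms := symbols.map (·.2)
  let cats := PySem.List.dedup (syms.filterMap pvCat)  -- filterMap: missing "category" is a KeyError in Python, outside Pre_
  cats.map (fun c => (c, syms.filter (fun s => pvCat s == some c)))

-- ===== PRECONDITION & SPEC =====
-- Pre_ excludes exactly the inputs where some symbol lacks a "category" key: Python A raises KeyError there.
def Pre_symbols_by_category (symbols : List (String × List (String × String))) : Prop :=
  (symbols.all (fun p => (p.2.map (·.1)).contains "category")) = true
instance (symbols : List (String × List (String × String))) : Decidable (Pre_symbols_by_category symbols) := by unfold Pre_symbols_by_category; infer_instance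
def pvWitness_symbols_by_category : (List (String × List (String × String))) :=
  [("a", [("category", "x"), ("name", "a")]), ("b", [("category", "x")])]

def Spec_symbols_by_category (symbols : List (String × List (String × String))) (out : List (String × List (List (String × String)))) : Prop := out = symbols_by_category_alt symbols
instance (symbols : List (String × List (String × String))) (out : List (String × List (List (String × String)))) : Decidable (Spec_symbols_by_category symbols out) := by unfold Spec_symbols_by_category; infer_instance

-- ===== CLAIM (what is proved, stated in full; the proofs are below) =====
def Claim_equal_symbols_by_category : Prop := ∀ (symbols : List (String × List (String × String))), Dom_symbols_by_category symbols → Pre_symbols_by_category symbols → Spec_symbols_by_category symbols (symbols_by_category symbols)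

-- ===== LEMMAS AND PROOFS =====

-- category/symbol pairs of the symbols that do have a category
def pvPairs (syms : List (List (String × String))) : List (String × List (String × String)) :=
  syms.filterMap (fun s => (pvCat s).map (fun c => (c, s)))

-- A's loop is the keyed modify-append loop over pvPairs
lemma foldl_step_eq_pairs (syms : List (List (String × String)))
    (d : PySem.Dict String (List (List (String × String)))) :
    syms.foldl (fun d sym =>
      match pvCat sym with
      | some k => if d.contains k then d.modify k [] (· ++ [sym]) else d.insert k [sym]
      | none => d) d
    = (pvPairs syms).foldl (fun d p => d.modify p.1 [] (· ++ [p.2])) d := by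
  induction syms generalizing d with
  | nil => rfl
  | cons s t ih =>
    simp only [List.foldl_cons, pvPairs, List.filterMap_cons]
    cases h : pvCat s with
    | none => simpa [pvPairs] using ih d
    | some k =>
      have hstep : (if d.contains k then d.modify k [] (· ++ [s]) else d.insert k [s])
          = d.modify k [] (· ++ [s]) := by
        by_cases hc : d.contains k = true
        · simp [hc]
        · simp only [Bool.not_eq_true] at hc
          simp [hc, PySem.Dict.modify, PySem.Dict.getD_of_not_contains d _ hc]
      simpa [pvPairs, hstep] using ih (d.modify k [] (· ++ [s]))

lemma pairs_map_fst (syms : List (List (String × String))) :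
    (pvPairs syms).map (·.1) = syms.filterMap pvCat := by
  induction syms with
  | nil => rfl
  | cons s t ih =>
    simp only [pvPairs, List.filterMap_cons] at *
    cases h : pvCat s <;> simp [ih]

lemma pairs_filter_map (syms : List (List (String × String))) (c : String) :
    ((pvPairs syms).filter (fun p => p.1 == c)).map (·.2)
      = syms.filter (fun s => pvCat s == some c) := by
  induction syms with
  | nil => rfl
  | cons s t ih =>
    simp only [pvPairs, List.filterMap_cons] at *
    cases h : pvCat s with
    | none => simp [h, ih]
    | some k =>
      by_cases hk : k = c <;> simp [h, hk, ih]

-- ===== VERDICT (by name: the statement is the Claim_ definition above) =====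
theorem symbols_by_category_spec : Claim_equal_symbols_by_category := by
  intro symbols _ _
  show symbols_by_category symbols = symbols_by_category_alt symbols
  unfold symbols_by_category symbols_by_category_alt
  set syms := symbols.map (·.2) with hs
  rw [foldl_step_eq_pairs]
  have hnd : ((pvPairs syms).foldl (fun d p => d.modify p.1 [] (· ++ [p.2]))
      (PySem.Dict.empty : PySem.Dict String (List (List (String × String))))).keys.Nodup := by
    exact PySem.Dict.nodup_keys_foldl_modify_key _ _ _ _ _ (by simp [PySem.Dict.keys_empty])
  rw [PySem.Dict.items_eq_map_keys _ hnd []]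
  rw [PySem.Dict.keys_foldl_modify_key]
  simp only [PySem.Dict.keys_empty, PySem.Set.update_nil_left, pairs_map_fst,
    PySem.List.dedup_eq_ofList]
  apply List.map_congr_left
  intro c _
  rw [PySem.Dict.getD_foldl_modify_append]
  simp [PySem.Dict.getD_empty, pairs_filter_map]
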